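-- pv_equiv track=rewrite | github.com/kemalbatut/olympic-data-pipeline | utils.py | get_name_permutations
-- ===== SOURCE A (Python) =====
-- def permutations_all_lengths(lst):
--     def permute(cur, remaining, result):
--         if cur:
--             result.append(cur[:])
--
--         for i in range(len(remaining)):
--             permute(cur + [remaining[i]], remaining[:i] + remaining[i + 1 :], result)
--
--     result = []
--     permute([], lst, result)
--     return result
--
-- def get_name_permutations(name: list[str]) -> list[str]:
--     new_name_list = []
--     for word in name[1:]:
--         if "-" in word:
--             unhyphenated = word.split("-")
--             new_name_list += unhyphenated
--         else:
--             new_name_list.append(word)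
--
--     # if there are multiple last names we have to check the olympic data
--     # against all of them and all of the permutations of them
--     if len(new_name_list) > 1:
--         permutations = permutations_all_lengths(new_name_list)
--         return [" ".join([name[0]] + permutation) for permutation in permutations]
--     else:
--         return [" ".join(name)]
-- ===== SOURCE B (Python) =====
-- def get_name_permutations(name: list[str]) -> list[str]:
--     new_name_list = []
--     for word in name[1:]:
--         if "-" in word:
--             new_name_list += word.split("-")
--         else:
--             new_name_list.append(word)
--
--     if len(new_name_list) > 1:
--         # explicit-stack pre-order DFS instead of the recursive helper;
--         # children are pushed in reverse index order so popping from the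
--         # end of the stack visits them left to right, reproducing the
--         # recursion's interleaved prefix order.
--         perms = []
--         stack = [([], new_name_list)]
--         while stack:
--             cur, remaining = stack.pop()
--             if cur:
--                 perms.append(cur)
--             for i in reversed(range(len(remaining))):
--                 stack.append((cur + [remaining[i]], remaining[:i] + remaining[i + 1:]))
--         return [" ".join([name[0]] + perm) for perm in perms]
--     else:
--         return [" ".join(name)]
-- ===== Notes on version B (the rewrite author's own statement) =====
-- stated objective: alternative
-- what changed: The recursive permute helper with a shared result accumulator is replaced by an explicit-stack pre-order DFS whose children are pushed in reverse index order, so the stack loop reproduces the recursion's interleaved prefix order; the hyphen-splitting preprocessing and the final join step are unchanged.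
import Mathlib
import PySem

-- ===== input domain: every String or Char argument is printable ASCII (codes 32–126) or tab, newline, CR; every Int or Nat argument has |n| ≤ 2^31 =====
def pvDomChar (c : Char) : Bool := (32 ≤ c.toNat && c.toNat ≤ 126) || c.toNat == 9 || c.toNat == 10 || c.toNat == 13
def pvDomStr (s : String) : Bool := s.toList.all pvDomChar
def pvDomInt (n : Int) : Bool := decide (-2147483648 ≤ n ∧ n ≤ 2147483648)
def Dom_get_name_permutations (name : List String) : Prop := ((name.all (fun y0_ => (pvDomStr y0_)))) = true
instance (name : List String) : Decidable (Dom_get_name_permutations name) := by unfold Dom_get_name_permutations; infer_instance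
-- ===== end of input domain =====

-- B replaces A's recursive `permute` helper by an explicit-stack pre-order DFS
-- (objective: alternative decomposition, same output in the same order).

-- Both Pythons build new_name_list with the identical loop over name[1:]; shared helper.
def pvSplitTail (name : List String) : List String :=
  (PySem.List.slice name (some 1) none).foldl
    (fun acc word =>
      -- word.split("-"): the literal separator "-" is nonempty, so split? is always `some`
      if PySem.Str.isIn "-" word then acc ++ (PySem.Str.split? word "-").getD []
      else acc ++ [word]) []

-- ===== PORT A =====
-- A's recursive permute(cur, remaining, result); the loop `for i in range(len(remaining))`
-- is the fold over List.finRange remaining.length (the index with its bound, needed for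
-- termination); remaining[:i] ++ remaining[i+1:] stays a slice expression.
def permuteA (cur remaining : List String) (result : List (List String)) : List (List String) :=
  let result1 := if cur.isEmpty then result else result ++ [cur]
  (List.finRange remaining.length).foldl
    (fun res i =>
      permuteA (cur ++ [remaining.get i])
        (PySem.List.slice remaining none (some (i : Int)) ++
         PySem.List.slice remaining (some ((i : Int) + 1)) none) res)
    result1
termination_by remaining.length
decreasing_by
  have h := i.isLt
  have hcast : ((i : Int) + 1) = ((i + 1 : Nat) : Int) := by push_cast; ring
  rw [hcast, PySem.List.slice_to_natCast, PySem.List.slice_from_natCast]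
  simp
  omega

def permutations_all_lengths (lst : List String) : List (List String) :=
  permuteA [] lst []

def get_name_permutations (name : List String) : List String :=
  let new_name_list := pvSplitTail name
  if new_name_list.length > 1 then
    (permutations_all_lengths new_name_list).map
      -- name[0]: this branch forces name ≠ [] (new_name_list comes from name[1:]),
      -- so the default of headD is never taken
      (fun permutation => PySem.Str.join " " (name.headD "" :: permutation))
  else
    [PySem.Str.join " " name]

-- ===== PORT B =====
-- termination measure for the DFS stack: each popped frame of fan-out n is replaced by
-- n frames of fan-out n-1, and n·n! < (n+1)!
def pvMeasure (stack : List (List String × List String)) : Nat :=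
  (stack.map (fun p => Nat.factorial (p.2.length + 1))).sum

-- B's while-loop over the stack; the Lean list holds the top of the Python stack FIRST:
-- stack.pop() is taking the head, and pushing the children in reversed index order is
-- prepending them in index order.
def dfsB (stack : List (List String × List String)) (acc : List (List String)) :
    List (List String) :=
  match stack with
  | [] => acc
  | (cur, remaining) :: rest =>
      dfsB
        ((List.finRange remaining.length).map
          (fun i =>
            (cur ++ [remaining.get i],
             PySem.List.slice remaining none (some (i : Int)) ++
             PySem.List.slice remaining (some ((i : Int) + 1)) none)) ++ rest)
        (if cur.isEmpty then acc else acc ++ [cur])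
termination_by pvMeasure stack
decreasing_by
  simp only [pvMeasure, List.map_append, List.sum_append, List.map_cons, List.sum_cons,
    List.map_map]
  have hkey : (List.map
      ((fun p : List String × List String => (p.2.length + 1).factorial) ∘ fun i : Fin remaining.length =>
        (cur ++ [remaining.get i],
          PySem.List.slice remaining none (some (i : Int)) ++
          PySem.List.slice remaining (some ((i : Int) + 1)) none))
      (List.finRange remaining.length)).sum < (remaining.length + 1).factorial := by
    have hc : ∀ i ∈ List.finRange remaining.length,
        ((fun p : List String × List String => (p.2.length + 1).factorial) ∘ fun i : Fin remaining.length =>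
          (cur ++ [remaining.get i],
            PySem.List.slice remaining none (some (i : Int)) ++
            PySem.List.slice remaining (some ((i : Int) + 1)) none)) i
        = remaining.length.factorial := by
      intro i _
      have h := i.isLt
      have hcast : ((i : Int) + 1) = ((i + 1 : Nat) : Int) := by push_cast; ring
      simp only [Function.comp, hcast, PySem.List.slice_to_natCast,
        PySem.List.slice_from_natCast, List.length_append, List.length_take, List.length_drop]
      congr 1
      omega
    rw [List.map_congr_left hc, List.map_const', List.sum_replicate, List.length_finRange,
      smul_eq_mul, Nat.factorial_succ]
    have h1 : 0 < remaining.length.factorial := Nat.factorial_pos _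
    nlinarith
  omega

def get_name_permutations_alt (name : List String) : List String :=
  let new_name_list := pvSplitTail name
  if new_name_list.length > 1 then
    (dfsB [([], new_name_list)] []).map
      (fun perm => PySem.Str.join " " (name.headD "" :: perm))
  else
    [PySem.Str.join " " name]

-- ===== PRECONDITION & SPEC =====
def Spec_get_name_permutations (name : List String) (out : List String) : Prop := out = get_name_permutations_alt name
instance (name : List String) (out : List String) : Decidable (Spec_get_name_permutations name out) := by unfold Spec_get_name_permutations; infer_instance

-- ===== CLAIM (what is proved, stated in full; the proofs are below) =====
def Claim_equal_get_name_permutations : Prop := ∀ (name : List String), Dom_get_name_permutations name → Spec_get_name_permutations name (get_name_permutations name)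

-- ===== LEMMAS AND PROOFS =====
-- The DFS over a whole stack is the left fold of A's recursive permute over the frames.
theorem dfsB_eq_foldl (stack : List (List String × List String)) (acc : List (List String)) :
    dfsB stack acc = stack.foldl (fun a p => permuteA p.1 p.2 a) acc := by
  induction stack, acc using dfsB.induct with
  | case1 acc => simp [dfsB]
  | case2 acc cur remaining rest ih =>
      rw [dfsB]
      rw [dite_eq_ite] at ih
      rw [ih, List.foldl_append, List.foldl_map, List.foldl_cons, permuteA]

-- ===== VERDICT (by name: the statement is the Claim_ definition above) =====
theorem get_name_permutations_spec : Claim_equal_get_name_permutations := by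
  intro name _
  unfold Spec_get_name_permutations get_name_permutations get_name_permutations_alt
    permutations_all_lengths
  simp only [dfsB_eq_foldl, List.foldl_cons, List.foldl_nil]
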